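-- pv_equiv track=rewrite | github.com/christnil/adventofcode-2019 | day12/part2.py | fd
-- ===== SOURCE A (Python) =====
-- def fd(v, d):
--     new_d = [d[0], d[1], d[2], d[3]]
--     for i in range(4):
--         for j in range(4):
--             if v[i] < v[j]:
--                 new_d[i] = new_d[i] + 1
--             elif v[i] > v[j]:
--                 new_d[i] = new_d[i] - 1
--     return new_d
-- ===== SOURCE B (Python) =====
-- def fd(v, d):
--     s = sorted(v[:4])
--     out = []
--     for i in range(4):
--         lo = s.index(v[i])          # first index of v[i] in sorted list = #elements < v[i]
--         hi = lo + s.count(v[i])     # past-the-end of the equal run = #elements <= v[i]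
--         out.append(d[i] + (4 - hi) - lo)
--     return out
-- ===== Notes on version B (the rewrite author's own statement) =====
-- stated objective: alternative
-- what changed: Replaces the 4x4 nested pairwise comparison loop by sorting the first four positions once and reading each body's delta as (#greater - #less) from the rank (first index) and multiplicity of its value in the sorted list.
import Mathlib
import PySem

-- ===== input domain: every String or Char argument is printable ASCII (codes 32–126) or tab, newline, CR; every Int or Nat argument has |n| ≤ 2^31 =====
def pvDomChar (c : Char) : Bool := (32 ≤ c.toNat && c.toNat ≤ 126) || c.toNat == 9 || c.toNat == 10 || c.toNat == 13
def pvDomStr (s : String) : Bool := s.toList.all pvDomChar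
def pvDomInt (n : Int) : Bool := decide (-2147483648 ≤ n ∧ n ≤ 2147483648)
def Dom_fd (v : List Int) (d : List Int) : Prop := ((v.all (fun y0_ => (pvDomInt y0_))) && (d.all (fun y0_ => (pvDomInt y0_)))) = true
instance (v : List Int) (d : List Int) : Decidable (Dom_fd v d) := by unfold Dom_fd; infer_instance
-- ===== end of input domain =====

-- B replaces A's nested 4×4 comparison loop by one sort of v[:4] plus rank/multiplicity lookups
-- (delta_i = #greater − #less); an alternative decomposition of the same computation.

-- ===== PORT A =====
def fd (v : List Int) (d : List Int) : List Int :=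
  let new_d : List Int := [PySem.List.pyGetD d 0 0, PySem.List.pyGetD d 1 0,
                           PySem.List.pyGetD d 2 0, PySem.List.pyGetD d 3 0]
  (PySem.List.pyRange 0 4 1).foldl (fun nd i =>
    (PySem.List.pyRange 0 4 1).foldl (fun nd j =>
      if PySem.List.pyGetD v i 0 < PySem.List.pyGetD v j 0 then
        PySem.List.pySetD nd i (PySem.List.pyGetD nd i 0 + 1)
      else if PySem.List.pyGetD v i 0 > PySem.List.pyGetD v j 0 then
        PySem.List.pySetD nd i (PySem.List.pyGetD nd i 0 - 1)
      else nd) nd) new_d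

-- ===== PORT B =====
def fd_alt (v : List Int) (d : List Int) : List Int :=
  let s := PySem.List.sorted (PySem.List.slice v (some 0) (some 4)) (fun x => x) false
  (PySem.List.pyRange 0 4 1).foldl (fun out i =>
    let x := PySem.List.pyGetD v i 0
    let lo : Nat := (PySem.List.index? s x).getD 0   -- s.index(v[i]); v[i] ∈ s for i < 4, so never none
    let hi : Nat := lo + PySem.List.count s x
    out ++ [PySem.List.pyGetD d i 0 + (4 - (hi : Int)) - (lo : Int)]) []

-- ===== PRECONDITION & SPEC =====
-- Pre_ excludes exactly the inputs on which A raises IndexError (fewer than 4 positions or 4 velocities).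
def Pre_fd (v : List Int) (d : List Int) : Prop := 4 ≤ v.length ∧ 4 ≤ d.length
instance (v : List Int) (d : List Int) : Decidable (Pre_fd v d) := by unfold Pre_fd; infer_instance
def pvWitness_fd : List Int × List Int := ([3, 1, 2, 1], [10, -2, 0, 5])
def Spec_fd (v : List Int) (d : List Int) (out : List Int) : Prop := out = fd_alt v d
instance (v : List Int) (d : List Int) (out : List Int) : Decidable (Spec_fd v d out) := by unfold Spec_fd; infer_instance

-- ===== CLAIM (what is proved, stated in full; the proofs are below) =====
def Claim_equal_fd : Prop := ∀ (v : List Int) (d : List Int), Dom_fd v d → Pre_fd v d → Spec_fd v d (fd v d)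

-- ===== LEMMAS AND PROOFS =====

-- A's per-pair contribution to the delta
def cmp3 (x y : Int) : Int := if x < y then 1 else if x > y then -1 else 0

-- A's inner j-loop with the range already evaluated
def innerL (v : List Int) (i : Int) (nd : List Int) : List Int :=
  ([0, 1, 2, 3] : List Int).foldl (fun nd j =>
    if PySem.List.pyGetD v i 0 < PySem.List.pyGetD v j 0 then
      PySem.List.pySetD nd i (PySem.List.pyGetD nd i 0 + 1)
    else if PySem.List.pyGetD v i 0 > PySem.List.pyGetD v j 0 then
      PySem.List.pySetD nd i (PySem.List.pyGetD nd i 0 - 1)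
    else nd) nd

theorem fd_unfold (v d : List Int) :
    fd v d = innerL v 3 (innerL v 2 (innerL v 1 (innerL v 0
      [PySem.List.pyGetD d 0 0, PySem.List.pyGetD d 1 0,
       PySem.List.pyGetD d 2 0, PySem.List.pyGetD d 3 0]))) := by
  unfold fd innerL
  rw [show PySem.List.pyRange 0 4 1 = ([0, 1, 2, 3] : List Int) from by decide]
  rfl

theorem set_self (nd : List Int) (i : Int) (h0 : 0 ≤ i) :
    PySem.List.pySetD nd i (PySem.List.pyGetD nd i 0) = nd := by
  by_cases hr : i < (nd.length : Int)
  · rw [PySem.List.pyGetD_eq_getElem nd 0 h0 hr, PySem.List.pySetD_of_nonneg nd _ h0]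
    exact List.set_getElem_self (by omega)
  · have hnone : PySem.List.pySet? nd i (PySem.List.pyGetD nd i 0) = none :=
      (PySem.List.pySet?_eq_none_iff nd i _).mpr (fun hin => hr hin.2)
    simp [PySem.List.pySetD, hnone]

theorem read_set (nd : List Int) (i a : Int) (h0 : 0 ≤ i) (h : i.toNat < nd.length) :
    PySem.List.pyGetD (PySem.List.pySetD nd i a) i 0 = a := by
  rw [PySem.List.pySetD_of_nonneg nd a h0,
      PySem.List.pyGetD_eq_getElem _ 0 h0 (by simp; omega)]
  simp

theorem collapse_set (nd : List Int) (i a b : Int) (h0 : 0 ≤ i) :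
    PySem.List.pySetD (PySem.List.pySetD nd i a) i b = PySem.List.pySetD nd i b := by
  rw [PySem.List.pySetD_of_nonneg nd a h0, PySem.List.pySetD_of_nonneg _ b h0,
      PySem.List.pySetD_of_nonneg nd b h0, List.set_set]

theorem step_eq (nd : List Int) (i : Int) (h0 : 0 ≤ i) (x y : Int) :
    (if x < y then PySem.List.pySetD nd i (PySem.List.pyGetD nd i 0 + 1)
     else if x > y then PySem.List.pySetD nd i (PySem.List.pyGetD nd i 0 - 1)
     else nd)
    = PySem.List.pySetD nd i (PySem.List.pyGetD nd i 0 + cmp3 x y) := by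
  rcases lt_trichotomy x y with hxy | hxy | hxy
  · simp [cmp3, hxy]
  · subst hxy
    simp [cmp3, set_self nd i h0]
  · have hnlt : ¬ x < y := lt_asymm hxy
    simp [cmp3, hxy, hnlt, sub_eq_add_neg]

theorem innerL_eq (v nd : List Int) (i : Int) (h0 : 0 ≤ i) (h : i.toNat < nd.length) :
    innerL v i nd = PySem.List.pySetD nd i
      (PySem.List.pyGetD nd i 0
        + cmp3 (PySem.List.pyGetD v i 0) (PySem.List.pyGetD v 0 0)
        + cmp3 (PySem.List.pyGetD v i 0) (PySem.List.pyGetD v 1 0)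
        + cmp3 (PySem.List.pyGetD v i 0) (PySem.List.pyGetD v 2 0)
        + cmp3 (PySem.List.pyGetD v i 0) (PySem.List.pyGetD v 3 0)) := by
  simp only [innerL, List.foldl]
  rw [step_eq _ _ h0, step_eq _ _ h0, step_eq _ _ h0, step_eq _ _ h0]
  simp [read_set, collapse_set, h0, h]

-- first index of x in a ≤-sorted list = number of elements strictly below x
theorem index?_sorted_eq_countP_lt (s : List Int) (x : Int)
    (hs : s.Pairwise (· ≤ ·)) (hx : x ∈ s) :
    PySem.List.index? s x = some (s.countP (fun y => decide (y < x))) := by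
  induction s with
  | nil => cases hx
  | cons a t ih =>
    rcases List.pairwise_cons.mp hs with ⟨ha, ht⟩
    by_cases hax : a = x
    · subst hax
      have h0 : (a :: t).countP (fun y => decide (y < a)) = 0 := by
        rw [List.countP_eq_zero]
        intro y hy
        rcases List.mem_cons.mp hy with rfl | hyt
        · simp
        · simpa using not_lt.mpr (ha y hyt)
      rw [h0]
      exact PySem.List.index?_cons_self a t
    · have hxt : x ∈ t := by
        rcases List.mem_cons.mp hx with rfl | hmem
        · exact absurd rfl hax
        · exact hmem
      have halt : a < x := lt_of_le_of_ne (ha x hxt) hax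
      rw [PySem.List.index?_cons_of_ne t hax, ih ht hxt]
      simp [halt]

theorem cmp3_char (x y : Int) :
    cmp3 x y = 1 - 2 * (if y < x then (1 : Int) else 0) - (if y = x then (1 : Int) else 0) := by
  rcases lt_trichotomy y x with h | h | h
  · simp [cmp3, h, lt_asymm h, (ne_of_lt h)]
  · subst h; simp [cmp3]
  · simp [cmp3, h, lt_asymm h, (ne_of_gt h)]

-- the per-body identity: rank/multiplicity form = pairwise-comparison form
theorem comp_eq (x y0 y1 y2 y3 di : Int) :
    di + (4 - ((([y0, y1, y2, y3].countP (fun y => decide (y < x))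
            + [y0, y1, y2, y3].count x : Nat)) : Int))
       - (([y0, y1, y2, y3].countP (fun y => decide (y < x)) : Nat) : Int)
    = di + cmp3 x y0 + cmp3 x y1 + cmp3 x y2 + cmp3 x y3 := by
  simp only [List.countP_cons, List.countP_nil, List.count_cons, List.count_nil,
    decide_eq_true_eq, beq_iff_eq, Nat.cast_add, Nat.cast_ite, Nat.cast_one, Nat.cast_zero,
    zero_add]
  rw [cmp3_char x y0, cmp3_char x y1, cmp3_char x y2, cmp3_char x y3]
  ring

-- ===== VERDICT (by name: the statement is the Claim_ definition above) =====
set_option maxHeartbeats 1600000 in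
theorem fd_spec : Claim_equal_fd := by
  intro v d _ hpre
  unfold Spec_fd
  obtain ⟨hv, hd⟩ := hpre
  rcases v with _ | ⟨v0, v⟩; · simp only [List.length_nil] at hv; omega
  rcases v with _ | ⟨v1, v⟩; · simp only [List.length_cons, List.length_nil] at hv; omega
  rcases v with _ | ⟨v2, v⟩; · simp only [List.length_cons, List.length_nil] at hv; omega
  rcases v with _ | ⟨v3, vr⟩; · simp only [List.length_cons, List.length_nil] at hv; omega
  rcases d with _ | ⟨d0, d⟩; · simp only [List.length_nil] at hd; omega
  rcases d with _ | ⟨d1, d⟩; · simp only [List.length_cons, List.length_nil] at hd; omega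
  rcases d with _ | ⟨d2, d⟩; · simp only [List.length_cons, List.length_nil] at hd; omega
  rcases d with _ | ⟨d3, dr⟩; · simp only [List.length_cons, List.length_nil] at hd; omega
  rw [fd_unfold,
      innerL_eq _ _ 0 (by norm_num) (by simp),
      innerL_eq _ _ 1 (by norm_num) (by simp [PySem.List.length_pySetD]),
      innerL_eq _ _ 2 (by norm_num) (by simp [PySem.List.length_pySetD]),
      innerL_eq _ _ 3 (by norm_num) (by simp [PySem.List.length_pySetD])]
  simp [pysem]
  simp only [fd_alt]
  rw [show PySem.List.slice (v0::v1::v2::v3::vr) (some 0) (some 4) = [v0,v1,v2,v3] from by simp [pysem],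
      show PySem.List.pyRange 0 4 1 = ([0,1,2,3] : List Int) from by decide]
  simp only [List.foldl]
  rw [show PySem.List.pyGetD (v0::v1::v2::v3::vr) (0:Int) 0 = v0 from by simp [pysem],
      show PySem.List.pyGetD (v0::v1::v2::v3::vr) (1:Int) 0 = v1 from by simp [pysem],
      show PySem.List.pyGetD (v0::v1::v2::v3::vr) (2:Int) 0 = v2 from by simp [pysem],
      show PySem.List.pyGetD (v0::v1::v2::v3::vr) (3:Int) 0 = v3 from by simp [pysem],
      show PySem.List.pyGetD (d0::d1::d2::d3::dr) (0:Int) 0 = d0 from by simp [pysem],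
      show PySem.List.pyGetD (d0::d1::d2::d3::dr) (1:Int) 0 = d1 from by simp [pysem],
      show PySem.List.pyGetD (d0::d1::d2::d3::dr) (2:Int) 0 = d2 from by simp [pysem],
      show PySem.List.pyGetD (d0::d1::d2::d3::dr) (3:Int) 0 = d3 from by simp [pysem]]
  have hpair : (PySem.List.sorted [v0,v1,v2,v3] (fun x => x) false).Pairwise (· ≤ ·) :=
    PySem.List.sorted_pairwise [v0,v1,v2,v3] (fun x => x)
  have hperm : (PySem.List.sorted [v0,v1,v2,v3] (fun x => x) false).Perm [v0,v1,v2,v3] :=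
    PySem.List.sorted_perm [v0,v1,v2,v3] (fun x => x) false
  have hidx : ∀ x, x ∈ ([v0,v1,v2,v3] : List Int) →
      PySem.List.index? (PySem.List.sorted [v0,v1,v2,v3] (fun x => x) false) x
        = some ([v0,v1,v2,v3].countP (fun y => decide (y < x))) := by
    intro x hx
    rw [index?_sorted_eq_countP_lt _ x hpair ((PySem.List.mem_sorted _ _ _ x).mpr hx),
        hperm.countP_eq]
  have hcnt : ∀ x : Int,
      PySem.List.count (PySem.List.sorted [v0,v1,v2,v3] (fun x => x) false) x
        = [v0,v1,v2,v3].count x := by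
    intro x
    rw [PySem.List.count_eq, hperm.count_eq]
  rw [hidx v0 (by simp), hidx v1 (by simp), hidx v2 (by simp), hidx v3 (by simp),
      hcnt v0, hcnt v1, hcnt v2, hcnt v3]
  simp only [Option.getD_some, List.nil_append, List.cons_append,
    List.cons.injEq, and_true]
  refine ⟨(comp_eq v0 v0 v1 v2 v3 d0).symm, (comp_eq v1 v0 v1 v2 v3 d1).symm,
          (comp_eq v2 v0 v1 v2 v3 d2).symm, (comp_eq v3 v0 v1 v2 v3 d3).symm⟩
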